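-- pv_equiv track=rewrite | github.com/zhu-jl18/novel-proofer | tests/support/corpus_cases.py | count_leading_blank_lines
-- ===== SOURCE A (Python) =====
-- def count_leading_blank_lines(text: str) -> int:
--     n = 0
--     i = 0
--     while True:
--         j = text.find("\n", i)
--         if j < 0:
--             break
--         line = text[i:j]
--         if line.strip() != "":
--             break
--         n += 1
--         i = j + 1
--     return n
-- ===== SOURCE B (Python) =====
-- def count_leading_blank_lines(text: str) -> int:
--     n = 0
--     seen = False
--     for ch in text:
--         if ch == "\n":
--             if seen:
--                 break
--             n += 1
--         elif not ch.isspace():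
--             seen = True
--     return n
-- ===== Notes on version B (the rewrite author's own statement) =====
-- stated objective: alternative
-- what changed: Replaced A's index loop of repeated find calls with per-line slicing and strip by a single character-level state machine that walks the text once, counting newlines while tracking whether the current line has seen a non-whitespace character.
import Mathlib
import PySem

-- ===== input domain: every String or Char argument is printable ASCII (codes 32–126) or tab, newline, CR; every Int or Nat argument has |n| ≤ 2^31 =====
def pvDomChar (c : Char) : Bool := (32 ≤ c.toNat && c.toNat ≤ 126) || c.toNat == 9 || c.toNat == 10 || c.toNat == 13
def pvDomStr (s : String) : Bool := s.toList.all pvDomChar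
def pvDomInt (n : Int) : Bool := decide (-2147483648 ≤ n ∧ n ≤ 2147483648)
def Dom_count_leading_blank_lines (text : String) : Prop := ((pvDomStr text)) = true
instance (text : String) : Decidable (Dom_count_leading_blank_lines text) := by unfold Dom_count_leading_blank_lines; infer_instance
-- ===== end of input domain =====

-- B replaces A's find/slice/strip index loop by a single character-level state machine (no slicing, no line strings); objective: alternative.

-- ===== PORT A =====
-- termination helper for A's loop: a found newline lies at an index in [i, length)
theorem pvFindNl_bounds (s : List Char) (i : Nat)
    (h : PySem.Chars.findFrom s ['\n'] (i : Int) ≠ -1) :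
    i ≤ (PySem.Chars.findFrom s ['\n'] (i : Int)).toNat ∧
      (PySem.Chars.findFrom s ['\n'] (i : Int)).toNat < s.length := by
  by_cases hi : i ≤ s.length
  · obtain ⟨h1, h2, _⟩ := PySem.Chars.findFrom_natCast_spec s ['\n'] i hi h
    have hpos : (0 : Int) ≤ PySem.Chars.findFrom s ['\n'] (i : Int) := le_trans (by exact_mod_cast Nat.zero_le i) h1
    refine ⟨?_, ?_⟩
    · omega
    · have : (List.drop (PySem.Chars.findFrom s ['\n'] (i : Int)).toNat s) ≠ [] := by
        intro hnil; rw [hnil] at h2; exact absurd (List.prefix_nil.mp h2) (by simp)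
      have := List.drop_eq_nil_iff.not.mp (by simpa using this)
      omega
  · exfalso; apply h
    simp only [PySem.Chars.findFrom]
    have h1 : (s.length : Int) < (i : Int) := by exact_mod_cast Nat.lt_of_not_le hi
    have h0 : ¬ ((i : Int) < 0) := by omega
    simp [h0, h1]

-- the while loop of A: j = find('\n', i); break on j < 0; break on non-blank slice; else n += 1, i = j + 1
def pvLoopA (s : List Char) (n : Int) (i : Nat) : Int :=
  let j := PySem.Chars.findFrom s ['\n'] (i : Int)
  if hj : j < 0 then n
  else
    let line := PySem.Chars.slice s (some (i : Int)) (some j)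
    if PySem.Chars.strip line ≠ [] then n
    else pvLoopA s (n + 1) (j.toNat + 1)
termination_by s.length - i
decreasing_by
  have h : PySem.Chars.findFrom s ['\n'] (i : Int) ≠ -1 := by omega
  have := pvFindNl_bounds s i h
  omega

def count_leading_blank_lines (text : String) : Int :=
  pvLoopA text.toList 0 0

-- ===== PORT B =====
-- the for loop of B: state (n, seen); '\n' breaks if seen else counts; non-space sets seen
def pvLoopB (cs : List Char) (n : Int) (seen : Bool) : Int :=
  match cs with
  | [] => n
  | c :: t =>
    if c = '\n' then (if seen then n else pvLoopB t (n + 1) seen)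
    else if ¬ PySem.Chars.isspace c then pvLoopB t n true
    else pvLoopB t n seen

def count_leading_blank_lines_alt (text : String) : Int :=
  pvLoopB text.toList 0 false

-- ===== PRECONDITION & SPEC =====
def Spec_count_leading_blank_lines (text : String) (out : Int) : Prop := out = count_leading_blank_lines_alt text
instance (text : String) (out : Int) : Decidable (Spec_count_leading_blank_lines text out) := by unfold Spec_count_leading_blank_lines; infer_instance

-- ===== CLAIM (what is proved, stated in full; the proofs are below) =====
def Claim_equal_count_leading_blank_lines : Prop := ∀ (text : String), Dom_count_leading_blank_lines text → Spec_count_leading_blank_lines text (count_leading_blank_lines text)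

-- ===== LEMMAS AND PROOFS =====

-- the common mathematical value: number of leading blank newline-terminated lines
def pvG : List Char → Int
  | [] => 0
  | c :: t => if c = '\n' then 1 + pvG t else if PySem.Chars.isspace c then pvG t else 0

theorem pvLoopB_true (t : List Char) (n : Int) : pvLoopB t n true = n := by
  induction t generalizing n with
  | nil => rfl
  | cons c t ih =>
    simp only [pvLoopB]
    split_ifs <;> simp [ih]

theorem pvLoopB_false (t : List Char) (n : Int) : pvLoopB t n false = n + pvG t := by
  induction t generalizing n with
  | nil => simp [pvLoopB, pvG]
  | cons c t ih =>
    by_cases h1 : c = '\n'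
    · simp only [pvLoopB, pvG, if_pos h1, Bool.false_eq_true, if_false, ih]; ring
    · by_cases h2 : PySem.Chars.isspace c
      · simp [pvLoopB, pvG, h1, h2, ih]
      · simp only [pvLoopB, pvG, if_neg h1, h2, not_false_iff, if_true, Bool.false_eq_true,
          if_false, pvLoopB_true]
        simp

theorem pvG_no_newline (t : List Char) (h : '\n' ∉ t) : pvG t = 0 := by
  induction t with
  | nil => rfl
  | cons c t ih =>
    simp only [List.mem_cons, not_or] at h
    simp only [pvG]
    rw [if_neg (by exact fun hc => h.1 hc.symm)]
    split_ifs with hs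
    · exact ih h.2
    · rfl

theorem pvG_split (l r : List Char) (h : '\n' ∉ l) :
    pvG (l ++ '\n' :: r) = if l.all PySem.Chars.isspace then 1 + pvG r else 0 := by
  induction l with
  | nil => simp [pvG]
  | cons c l ih =>
    simp only [List.mem_cons, not_or] at h
    have hc : ¬ c = '\n' := fun hc => h.1 hc.symm
    simp only [List.cons_append, pvG, List.all_cons, if_neg hc]
    by_cases hs : PySem.Chars.isspace c
    · rw [if_pos hs, ih h.2]
      simp [hs]
    · rw [if_neg hs]
      simp [hs]

theorem pvStrip_eq_nil_iff (l : List Char) :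
    PySem.Chars.strip l = [] ↔ l.all PySem.Chars.isspace := by
  simp only [PySem.Chars.strip, PySem.Chars.rstrip, PySem.Chars.lstrip,
    List.reverse_eq_nil_iff, List.dropWhile_eq_nil_iff, List.mem_reverse, List.all_eq_true]
  constructor
  · intro h x hx
    by_cases hxs : PySem.Chars.isspace x
    · exact hxs
    · refine h x ?_
      rw [← List.takeWhile_append_dropWhile (p := PySem.Chars.isspace) (l := l),
        List.mem_append] at hx
      rcases hx with h1 | h2
      · exact absurd (List.mem_takeWhile_imp h1) hxs
      · exact h2
  · intro h x hx
    exact h x ((List.dropWhile_sublist _).subset hx)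

-- the found newline splits the suffix: drop i = (newline-free, sliced line) ++ '\n' :: rest
theorem pvSplitNl (s : List Char) (i : Nat) (hi : i ≤ s.length)
    (h : PySem.Chars.findFrom s ['\n'] (i : Int) ≠ -1) :
    s.drop i = (s.drop i).take ((PySem.Chars.findFrom s ['\n'] (i : Int)).toNat - i)
        ++ '\n' :: s.drop ((PySem.Chars.findFrom s ['\n'] (i : Int)).toNat + 1) ∧
    '\n' ∉ (s.drop i).take ((PySem.Chars.findFrom s ['\n'] (i : Int)).toNat - i) ∧
    PySem.Chars.slice s (some (i : Int)) (some (PySem.Chars.findFrom s ['\n'] (i : Int)))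
      = (s.drop i).take ((PySem.Chars.findFrom s ['\n'] (i : Int)).toNat - i) := by
  obtain ⟨h1, h2, h3⟩ := PySem.Chars.findFrom_natCast_spec s ['\n'] i hi h
  obtain ⟨hle, hlt⟩ := pvFindNl_bounds s i h
  set j := PySem.Chars.findFrom s ['\n'] (i : Int) with hjdef
  set m := j.toNat with hmdef
  have hdropm : s.drop m = '\n' :: s.drop (m + 1) := by
    rcases h2 with ⟨t', ht'⟩
    have hcons : List.drop m s = '\n' :: t' := by simp [← ht']
    have hht := (List.drop_eq_getElem_cons hlt).symm.trans hcons
    have hg : s[m]'hlt = '\n' := (List.cons_eq_cons.mp hht).1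
    rw [List.drop_eq_getElem_cons hlt, hg]
  have hnin : '\n' ∉ (s.drop i).take (m - i) := by
    intro hmem
    obtain ⟨k, hk, hget⟩ := List.getElem_of_mem hmem
    have hklen : k < m - i := lt_of_lt_of_le hk (by simp)
    have hkl : i + k < s.length := by omega
    have hgs : s[i + k]'hkl = '\n' := by
      rw [List.getElem_take] at hget
      rw [List.getElem_drop] at hget
      exact hget
    apply h3 (i + k) (Nat.le_add_right _ _) (by omega)
    rw [List.drop_eq_getElem_cons hkl, hgs]
    exact ⟨s.drop (i + k + 1), rfl⟩
  refine ⟨?_, hnin, ?_⟩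
  · conv_lhs => rw [← List.take_append_drop (m - i) (s.drop i)]
    rw [List.drop_drop]
    have he : i + (m - i) = m := by omega
    rw [he, hdropm]
  · have hj0 : (0 : Int) ≤ j := le_trans (by exact_mod_cast Nat.zero_le i) h1
    have hjm : j = (m : Int) := by omega
    rw [hjm]
    simp only [PySem.Chars.slice_eq_listSlice]
    rw [PySem.List.slice_natCast]

-- main invariant: A's loop from index i adds the blank-line count of the suffix
theorem pvLoopA_eq (s : List Char) (n : Int) (i : Nat) :
    i ≤ s.length → pvLoopA s n i = n + pvG (s.drop i) := by
  fun_induction pvLoopA s n i with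
  | case1 n i j hj =>
    intro hi
    have hjeq : PySem.Chars.findFrom s ['\n'] (i : Int) = -1 := by
      by_contra hne
      have := (pvFindNl_bounds s i hne).1
      have hj0 : (0:Int) ≤ PySem.Chars.findFrom s ['\n'] (i : Int) := by
        obtain ⟨h1, -, -⟩ := PySem.Chars.findFrom_natCast_spec s ['\n'] i hi hne
        exact le_trans (by exact_mod_cast Nat.zero_le i) h1
      simp only [j] at hj
      omega
    have hinf := (PySem.Chars.findFrom_natCast_eq_neg_one_iff s ['\n'] i hi).mp hjeq
    have hnin : '\n' ∉ s.drop i := fun hm => hinf (List.infix_iff_prefix_suffix.mpr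
      (by
        obtain ⟨l1, l2, hsplit⟩ := List.append_of_mem hm
        exact ⟨'\n' :: l2, ⟨l2, rfl⟩, hsplit ▸ ⟨l1, rfl⟩⟩))
    rw [pvG_no_newline _ hnin]; ring
  | case2 n i j hj line hline =>
    intro hi
    have hne : PySem.Chars.findFrom s ['\n'] (i : Int) ≠ -1 := by
      simp only [j] at hj; omega
    obtain ⟨hsp, hnin, hslice⟩ := pvSplitNl s i hi hne
    have hslice' : PySem.List.slice s (some (i : Int)) (some j)
        = (s.drop i).take (j.toNat - i) := by simpa using hslice
    have hnotall : ¬ ((s.drop i).take (j.toNat - i)).all PySem.Chars.isspace := by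
      intro hall
      apply hline
      rw [pvStrip_eq_nil_iff]
      simpa [line, hslice'] using hall
    rw [hsp, pvG_split _ _ hnin, if_neg hnotall]; ring
  | case3 n i j hj line hline ih =>
    intro hi
    have hne : PySem.Chars.findFrom s ['\n'] (i : Int) ≠ -1 := by
      simp only [j] at hj; omega
    obtain ⟨hsp, hnin, hslice⟩ := pvSplitNl s i hi hne
    have hslice' : PySem.List.slice s (some (i : Int)) (some j)
        = (s.drop i).take (j.toNat - i) := by simpa using hslice
    obtain ⟨-, hlt⟩ := pvFindNl_bounds s i hne
    have hall : ((s.drop i).take (j.toNat - i)).all PySem.Chars.isspace := by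
      have := not_not.mp hline
      rw [pvStrip_eq_nil_iff] at this
      simpa [line, hslice'] using this
    rw [ih (by omega), hsp, pvG_split _ _ hnin, if_pos hall]; ring

theorem count_leading_blank_lines_spec : Claim_equal_count_leading_blank_lines := by
  intro text _
  unfold Spec_count_leading_blank_lines count_leading_blank_lines count_leading_blank_lines_alt
  rw [pvLoopB_false, pvLoopA_eq text.toList 0 0 (Nat.zero_le _)]
  simp
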